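-- pv_equiv track=rewrite | github.com/fmalina/unilex | unilex/vocabulary/load_xls.py | last_full_cell
-- ===== SOURCE A (Python) =====
-- def last_full_cell(row_data):
--     """Return last cell with text in and its column number"""
--     rear_cells = []  # until full cell is found
--     for x in reversed(row_data):
--         rear_cells.append(x)
--         if x != '':
--             break
--     last_full_cell = len(row_data) - len(rear_cells)
--     return row_data[last_full_cell], last_full_cell
-- ===== SOURCE B (Python) =====
-- def last_full_cell(row_data):
--     """Return last cell with text in and its column number"""
--     idx = 0
--     for i, x in enumerate(row_data):
--         if x != '':
--             idx = i
--     return row_data[idx], idx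
-- ===== Notes on version B (the rewrite author's own statement) =====
-- stated objective: idiomatic
-- what changed: Replaces the reverse scan that accumulates a tail list and breaks at the first non-empty cell by a single forward enumerate loop that just tracks the index of the last non-empty cell seen.
-- outside the precondition, e.g. on last_full_cell([]): A raises IndexError, B raises IndexError
import Mathlib
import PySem

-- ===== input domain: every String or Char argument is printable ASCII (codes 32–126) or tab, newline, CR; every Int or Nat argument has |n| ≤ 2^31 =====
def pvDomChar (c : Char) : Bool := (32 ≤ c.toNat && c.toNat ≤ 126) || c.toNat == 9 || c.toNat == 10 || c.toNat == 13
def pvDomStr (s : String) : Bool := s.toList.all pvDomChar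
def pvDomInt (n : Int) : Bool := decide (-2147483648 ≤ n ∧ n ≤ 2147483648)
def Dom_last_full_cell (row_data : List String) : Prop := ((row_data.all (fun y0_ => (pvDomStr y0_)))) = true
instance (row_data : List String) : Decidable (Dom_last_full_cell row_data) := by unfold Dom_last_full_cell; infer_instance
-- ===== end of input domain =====

-- B replaces A's reverse scan with a break and a tail-accumulator list by a forward
-- enumerate loop tracking the index of the last non-empty cell (objective: idiomatic).

-- ===== PORT A =====
-- the `for x in reversed(row_data): rear_cells.append(x); if x != '': break` loop,
-- tracked by the only thing used afterwards: len(rear_cells)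
def rearCount : List String → Nat
  | [] => 0
  | x :: rest => if x ≠ "" then 1 else 1 + rearCount rest

def last_full_cell (row_data : List String) : String × Int :=
  let idx : Int := (row_data.length : Int) - (rearCount row_data.reverse : Int)
  ((PySem.List.pyGet? row_data idx).getD "", idx)

-- ===== PORT B =====
def last_full_cell_alt (row_data : List String) : String × Int :=
  let idx : Int := (PySem.List.enumerate row_data 0).foldl
      (fun acc p => if p.2 ≠ "" then p.1 else acc) 0
  ((PySem.List.pyGet? row_data idx).getD "", idx)

-- ===== PRECONDITION & SPEC =====
-- Pre_ excludes only the empty list, where Python's row_data[0] raises IndexError.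
def Pre_last_full_cell (row_data : List String) : Prop := row_data ≠ []
instance (row_data : List String) : Decidable (Pre_last_full_cell row_data) := by unfold Pre_last_full_cell; infer_instance
def pvWitness_last_full_cell : List String := ["", "a", ""]

def Spec_last_full_cell (row_data : List String) (out : String × Int) : Prop := out = last_full_cell_alt row_data
instance (row_data : List String) (out : String × Int) : Decidable (Spec_last_full_cell row_data out) := by unfold Spec_last_full_cell; infer_instance

-- ===== CLAIM (what is proved, stated in full; the proofs are below) =====
def Claim_equal_last_full_cell : Prop := ∀ (row_data : List String), Dom_last_full_cell row_data → Pre_last_full_cell row_data → Spec_last_full_cell row_data (last_full_cell row_data)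

-- ===== LEMMAS AND PROOFS =====

-- B's forward fold computes exactly A's index len(row_data) - len(rear_cells)
theorem idx_eq (l : List String) (h : l ≠ []) :
    (PySem.List.enumerate l 0).foldl (fun acc p => if p.2 ≠ "" then p.1 else acc) 0
      = (l.length : Int) - (rearCount l.reverse : Int) := by
  induction l using List.reverseRecOn with
  | nil => exact absurd rfl h
  | append_singleton l x ih =>
    rw [PySem.List.enumerate_append, List.foldl_append, List.reverse_append,
        PySem.List.enumerate_cons, PySem.List.enumerate_nil]
    simp only [List.foldl_cons, List.foldl_nil, List.reverse_singleton,
      List.singleton_append, List.length_append, List.length_cons, List.length_nil]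
    by_cases hx : x = ""
    · simp only [hx, rearCount, ne_eq, not_true_eq_false, if_false]
      cases l with
      | nil => simp [PySem.List.enumerate_nil, rearCount]
      | cons y ys =>
        rw [ih (by simp)]
        push_cast
        ring
    · simp only [rearCount, ne_eq, hx, not_false_eq_true, if_true]
      push_cast
      ring

-- ===== VERDICT (by name: the statement is the Claim_ definition above) =====
theorem last_full_cell_spec : Claim_equal_last_full_cell := by
  intro l _ hpre
  unfold Spec_last_full_cell last_full_cell last_full_cell_alt
  rw [idx_eq l hpre]
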